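-- pv_equiv track=rewrite | github.com/jnskm/jnskm.github.io | scripts/build_library.py | normalize_themes
-- ===== SOURCE A (Python) =====
-- VALID_THEMES = {
--     # Hard seasons
--     "anxious", "weary", "grieving", "doubting", "lonely", "ashamed", "guilty",
--     "discouraged", "forgotten", "afraid", "tempted", "confused", "striving", "proud",
--     # Gentler seasons
--     "hopeful", "grateful", "joyful", "peaceful", "loved", "forgiven", "restored",
--     "trusting", "waiting", "resting", "surrendered", "called",
-- }
--
-- THEME_ALIAS = {
--     "resentful": "proud",
--     "lost": "lonely",
--     "humble": "surrendered",
--     "distracted": "confused",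
--     "faithful": "trusting",
--     "known": "loved",
--     "longing": "lonely",
-- }
--
-- def normalize_themes(themes: list[str]) -> list[str]:
--     out: list[str] = []
--     for t in themes or []:
--         if t in VALID_THEMES:
--             out.append(t)
--         elif t in THEME_ALIAS:
--             alias = THEME_ALIAS[t]
--             if alias not in out:
--                 out.append(alias)
--         # else: drop silently — other valid themes on the same item remain
--     # Deduplicate while preserving order
--     seen = set()
--     deduped = []
--     for t in out:
--         if t not in seen:
--             seen.add(t)
--             deduped.append(t)
--     return deduped
-- ===== SOURCE B (Python) =====
-- VALID_THEMES = {
--     "anxious", "weary", "grieving", "doubting", "lonely", "ashamed", "guilty",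
--     "discouraged", "forgotten", "afraid", "tempted", "confused", "striving", "proud",
--     "hopeful", "grateful", "joyful", "peaceful", "loved", "forgiven", "restored",
--     "trusting", "waiting", "resting", "surrendered", "called",
-- }
--
-- THEME_ALIAS = {
--     "resentful": "proud",
--     "lost": "lonely",
--     "humble": "surrendered",
--     "distracted": "confused",
--     "faithful": "trusting",
--     "known": "loved",
--     "longing": "lonely",
-- }
--
-- def normalize_themes(themes: list[str]) -> list[str]:
--     # single pass: canonicalize each entry and keep first occurrences only
--     seen = set()
--     result: list[str] = []
--     for t in themes or []:
--         if t in VALID_THEMES: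
--             c = t
--         elif t in THEME_ALIAS:
--             c = THEME_ALIAS[t]
--         else:
--             continue
--         if c not in seen:
--             seen.add(c)
--             result.append(c)
--     return result
-- ===== Notes on version B (the rewrite author's own statement) =====
-- stated objective: simpler
-- what changed: Fuses A's two passes (build intermediate list with a redundant alias-dedup guard, then dedup) into one pass that canonicalizes each entry and appends it on first sight, dropping the intermediate list entirely.
import Mathlib
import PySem

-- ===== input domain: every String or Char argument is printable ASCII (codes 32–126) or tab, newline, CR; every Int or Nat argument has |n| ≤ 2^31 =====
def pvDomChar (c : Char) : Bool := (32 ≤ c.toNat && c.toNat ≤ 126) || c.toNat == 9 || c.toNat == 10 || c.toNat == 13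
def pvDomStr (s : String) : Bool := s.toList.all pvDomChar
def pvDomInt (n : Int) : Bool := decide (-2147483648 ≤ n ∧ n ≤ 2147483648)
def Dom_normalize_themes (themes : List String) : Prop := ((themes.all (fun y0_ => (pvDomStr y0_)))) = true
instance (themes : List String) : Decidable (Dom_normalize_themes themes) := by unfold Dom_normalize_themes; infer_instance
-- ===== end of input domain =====

-- B fuses A's two passes (intermediate list + trailing dedup) into one first-occurrence pass; same return value, simpler.

-- ===== PORT A =====
def pvValidThemes : PySem.Set String := PySem.Set.ofList
  ["anxious", "weary", "grieving", "doubting", "lonely", "ashamed", "guilty",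
   "discouraged", "forgotten", "afraid", "tempted", "confused", "striving", "proud",
   "hopeful", "grateful", "joyful", "peaceful", "loved", "forgiven", "restored",
   "trusting", "waiting", "resting", "surrendered", "called"]

def pvThemeAlias : PySem.Dict String String := PySem.Dict.ofList
  [("resentful", "proud"), ("lost", "lonely"), ("humble", "surrendered"),
   ("distracted", "confused"), ("faithful", "trusting"), ("known", "loved"),
   ("longing", "lonely")]

def normalize_themes (themes : List String) : List String :=
  -- first loop: build `out`
  let out : List String := themes.foldl (fun out t =>
    if t ∈ pvValidThemes then out ++ [t]
    else match pvThemeAlias.get? t with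
      | some al => if al ∈ out then out else out ++ [al]
      | none => out) []
  -- second loop: deduplicate while preserving order
  let sd : PySem.Set String × List String := out.foldl (fun sd t =>
    if t ∈ sd.1 then sd else (PySem.Set.add sd.1 t, sd.2 ++ [t])) (PySem.Set.empty, [])
  sd.2

-- ===== PORT B =====
def normalize_themes_alt (themes : List String) : List String :=
  (themes.foldl (fun (p : PySem.Set String × List String) t =>
    match (if t ∈ pvValidThemes then some t else pvThemeAlias.get? t) with
    | none => p
    | some c => if c ∈ p.1 then p else (PySem.Set.add p.1 c, p.2 ++ [c]))
    (PySem.Set.empty, [])).2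

-- ===== PRECONDITION & SPEC =====
def Spec_normalize_themes (themes : List String) (out : List String) : Prop := out = normalize_themes_alt themes
instance (themes : List String) (out : List String) : Decidable (Spec_normalize_themes themes out) := by unfold Spec_normalize_themes; infer_instance

-- ===== CLAIM (what is proved, stated in full; the proofs are below) =====
def Claim_equal_normalize_themes : Prop := ∀ (themes : List String), Dom_normalize_themes themes → Spec_normalize_themes themes (normalize_themes themes)

-- ===== LEMMAS AND PROOFS =====

-- canonical value of an entry (none = dropped)
def pvCanon (t : String) : Option String :=
  if t ∈ pvValidThemes then some t else pvThemeAlias.get? t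

-- A's dedup step / B's fused step
def pvDStep (p : PySem.Set String × List String) (c : String) : PySem.Set String × List String :=
  if c ∈ p.1 then p else (PySem.Set.add p.1 c, p.2 ++ [c])

def pvBStep (p : PySem.Set String × List String) (t : String) : PySem.Set String × List String :=
  match pvCanon t with
  | none => p
  | some c => pvDStep p c

-- the suffix A's first loop appends when starting from accumulator `out`
def pvOutD (out : List String) : List String → List String
  | [] => []
  | t :: ts =>
    if t ∈ pvValidThemes then t :: pvOutD (out ++ [t]) ts
    else match pvThemeAlias.get? t with
      | some a => if a ∈ out then pvOutD out ts else a :: pvOutD (out ++ [a]) ts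
      | none => pvOutD out ts

lemma outLoop_eq_append_outD (ts : List String) : ∀ (out : List String),
    ts.foldl (fun out t =>
      if t ∈ pvValidThemes then out ++ [t]
      else match pvThemeAlias.get? t with
        | some al => if al ∈ out then out else out ++ [al]
        | none => out) out = out ++ pvOutD out ts := by
  induction ts with
  | nil => intro out; simp [pvOutD]
  | cons t ts ih =>
    intro out
    simp only [List.foldl_cons, pvOutD]
    by_cases hv : t ∈ pvValidThemes
    · simp [hv, ih]
    · simp only [hv, if_false]
      cases h : pvThemeAlias.get? t with
      | none => simp [ih]
      | some a =>
        by_cases ha : a ∈ out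
        · simp [ha, ih]
        · simp [ha, ih]

lemma mem_add_of_mem {s : PySem.Set String} {x y : String} (h : x ∈ s) : x ∈ PySem.Set.add s y := by
  simp [PySem.Set.mem_add]; exact Or.inl h

lemma dedup_outD_eq_bloop (ts : List String) : ∀ (out : List String) (p : PySem.Set String × List String),
    (∀ x, x ∈ out → x ∈ p.1) →
    (pvOutD out ts).foldl pvDStep p = ts.foldl pvBStep p := by
  induction ts with
  | nil => intro out p _; simp [pvOutD]
  | cons t ts ih =>
    intro out p hinv
    simp only [pvOutD, List.foldl_cons]
    by_cases hv : t ∈ pvValidThemes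
    · -- valid: both append t (modulo dedup)
      simp only [hv, if_true, List.foldl_cons, pvBStep, pvCanon]
      apply ih
      intro x hx
      rcases List.mem_append.mp hx with hx | hx
      · unfold pvDStep
        split
        · exact hinv x hx
        · exact mem_add_of_mem (hinv x hx)
      · simp at hx; subst hx
        unfold pvDStep
        split
        · assumption
        · simp [PySem.Set.mem_add]
    · simp only [hv, if_false]
      cases h : pvThemeAlias.get? t with
      | none =>
        have hb : pvBStep p t = p := by simp [pvBStep, pvCanon, hv, h]
        rw [hb]; exact ih out p hinv
      | some a =>
        by_cases ha : a ∈ out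
        · -- alias already in out ⇒ in seen ⇒ B's step is a no-op too
          have hs : a ∈ p.1 := hinv a ha
          have hb : pvBStep p t = p := by simp [pvBStep, pvCanon, hv, h, pvDStep, hs]
          simp only [ha, if_true, hb]
          exact ih out p hinv
        · simp only [ha, if_false, List.foldl_cons]
          have hb : pvBStep p t = pvDStep p a := by simp [pvBStep, pvCanon, hv, h]
          rw [hb]
          apply ih
          intro x hx
          rcases List.mem_append.mp hx with hx | hx
          · unfold pvDStep
            split
            · exact hinv x hx
            · exact mem_add_of_mem (hinv x hx)
          · simp at hx; subst hx
            unfold pvDStep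
            split
            · assumption
            · simp [PySem.Set.mem_add]

-- ===== VERDICT (by name: the statement is the Claim_ definition above) =====
theorem normalize_themes_spec : Claim_equal_normalize_themes := by
  intro themes _
  unfold Spec_normalize_themes normalize_themes normalize_themes_alt
  rw [outLoop_eq_append_outD themes []]
  simp only [List.nil_append]
  have h1 : (pvOutD [] themes).foldl
      (fun sd t => if t ∈ sd.1 then sd else (PySem.Set.add sd.1 t, sd.2 ++ [t]))
      ((PySem.Set.empty : PySem.Set String), ([] : List String))
      = (pvOutD [] themes).foldl pvDStep (PySem.Set.empty, []) := rfl
  have h2 : themes.foldl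
      (fun (p : PySem.Set String × List String) t =>
        match (if t ∈ pvValidThemes then some t else pvThemeAlias.get? t) with
        | none => p
        | some c => if c ∈ p.1 then p else (PySem.Set.add p.1 c, p.2 ++ [c]))
      (PySem.Set.empty, []) = themes.foldl pvBStep (PySem.Set.empty, []) := by
    apply PySem.List.foldl_congr_mem
    intro p t _
    simp [pvBStep, pvCanon, pvDStep]
  rw [h1, h2, dedup_outD_eq_bloop themes [] (PySem.Set.empty, []) (by intro x hx; cases hx)]
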